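-- pv_equiv track=rewrite | github.com/dalyndalton/aoc-2023 | day1/igiveup.py | checkForNumber
-- ===== SOURCE A (Python) =====
-- words = {
--     "one": "1",
--     "two": "2",
--     "three": "3",
--     "four": "4",
--     "five": "5",
--     "six": "6",
--     "seven": "7",
--     "eight": "8",
--     "nine": "9",
-- }
--
-- def checkForNumber(string):
--     substring = string[0:]
--     for i in range(len(string)):
--         if substring in words:
--             return words[substring]
--         else:
--             substring = substring[1:]
--     return "a"
-- ===== SOURCE B (Python) =====
-- words = {
--     "one": "1",
--     "two": "2",
--     "three": "3",
--     "four": "4",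
--     "five": "5",
--     "six": "6",
--     "seven": "7",
--     "eight": "8",
--     "nine": "9",
-- }
--
-- def checkForNumber(string):
--     best_len = -1
--     best = "a"
--     for word, digit in words.items():
--         if string.endswith(word) and len(word) > best_len:
--             best_len = len(word)
--             best = digit
--     return best
-- ===== Notes on version B (the rewrite author's own statement) =====
-- stated objective: faster
-- what changed: Instead of slicing the string suffix by suffix (longest first) and testing each slice for dict membership, B makes one pass over the fixed nine (word, digit) pairs, keeps the longest word that is a suffix via string.endswith, and returns its digit (or 'a' if none matches).
import Mathlib
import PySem

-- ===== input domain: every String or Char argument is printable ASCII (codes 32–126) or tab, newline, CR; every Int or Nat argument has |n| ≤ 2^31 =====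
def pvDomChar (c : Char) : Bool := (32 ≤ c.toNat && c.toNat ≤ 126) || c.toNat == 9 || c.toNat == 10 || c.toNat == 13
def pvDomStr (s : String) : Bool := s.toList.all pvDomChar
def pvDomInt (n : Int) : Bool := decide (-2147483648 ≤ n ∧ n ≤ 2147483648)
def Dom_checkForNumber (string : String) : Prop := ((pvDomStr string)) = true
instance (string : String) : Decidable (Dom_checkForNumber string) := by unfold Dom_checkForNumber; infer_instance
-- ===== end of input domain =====

-- B replaces A's longest-to-shortest suffix-slicing scan over the string by a single pass
-- over the fixed nine (word, digit) pairs that keeps the longest word that is a suffix (objective: alternative).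

-- ===== PORT A =====
-- the module-level dict `words`, keyed by the word's characters
def pvWordPairs : List (List Char × String) :=
  [("one".toList, "1"), ("two".toList, "2"), ("three".toList, "3"),
   ("four".toList, "4"), ("five".toList, "5"), ("six".toList, "6"),
   ("seven".toList, "7"), ("eight".toList, "8"), ("nine".toList, "9")]

def pvWords : PySem.Dict (List Char) String := PySem.Dict.ofList pvWordPairs

-- the `for i in range(len(string))` loop: each step tests `substring in words`
-- (membership + indexing ported as one get?) and otherwise takes substring[1:]
def pvAGo : Nat → List Char → String
  | 0, _ => "a"
  | n + 1, sub =>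
    match pvWords.get? sub with
    | some v => v
    | none => pvAGo n (PySem.List.slice sub (some 1) none)

def checkForNumber (string : String) : String :=
  -- len(string) ≥ 0, so .toNat is exact here
  pvAGo (PySem.Str.len string).toNat (PySem.Str.slice string (some 0) none).toList

-- ===== PORT B =====
-- words.items() as B iterates it
def pvWordItems : List (String × String) :=
  [("one", "1"), ("two", "2"), ("three", "3"), ("four", "4"), ("five", "5"),
   ("six", "6"), ("seven", "7"), ("eight", "8"), ("nine", "9")]

-- best_len/best accumulator; `string.endswith(word) and len(word) > best_len`
def checkForNumber_alt (string : String) : String :=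
  (pvWordItems.foldl
    (fun acc wd =>
      if PySem.Str.endswith string wd.1 && decide (PySem.Str.len wd.1 > acc.1)
      then (PySem.Str.len wd.1, wd.2)
      else acc)
    ((-1 : Int), "a")).2

-- ===== PRECONDITION & SPEC =====
def Spec_checkForNumber (string : String) (out : String) : Prop := out = checkForNumber_alt string
instance (string : String) (out : String) : Decidable (Spec_checkForNumber string out) := by unfold Spec_checkForNumber; infer_instance

-- ===== CLAIM (what is proved, stated in full; the proofs are below) =====
def Claim_equal_checkForNumber : Prop := ∀ (string : String), Dom_checkForNumber string → Spec_checkForNumber string (checkForNumber string)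

-- ===== LEMMAS AND PROOFS =====

lemma pv_items : pvWords.items = pvWordPairs := by decide

lemma pv_nodup : pvWords.keys.Nodup := by decide

lemma pv_get?_some_mem {sub : List Char} {v : String} (h : pvWords.get? sub = some v) :
    (sub, v) ∈ pvWordPairs := by
  have := PySem.Dict.mem_items_of_get?_eq_some _ h
  rwa [pv_items] at this

lemma pv_get?_none_not_mem {sub : List Char} (h : pvWords.get? sub = none) (v : String) :
    (sub, v) ∉ pvWordPairs := by
  intro hm
  rw [← pv_items] at hm
  have := PySem.Dict.get?_of_mem_items _ hm pv_nodup
  simp [h] at this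

-- at most one of the nine words is a suffix of any given string
lemma pv_excl {l : List Char} {p q : List Char × String}
    (hp : p ∈ pvWordPairs) (hq : q ∈ pvWordPairs)
    (hps : p.1 <:+ l) (hqs : q.1 <:+ l) : p = q := by
  have key : ∀ p ∈ pvWordPairs, ∀ q ∈ pvWordPairs, p.1 <:+ q.1 → p = q := by decide
  rcases le_total p.1.length q.1.length with h | h
  · exact key p hp q hq (List.suffix_of_suffix_length_le hps hqs h)
  · exact (key q hq p hp (List.suffix_of_suffix_length_le hqs hps h)).symm

lemma pvAGo_nomatch : ∀ sub : List Char,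
    (∀ p ∈ pvWordPairs, ¬ p.1 <:+ sub) → pvAGo sub.length sub = "a" := by
  intro sub
  induction sub with
  | nil => intro _; rfl
  | cons c t ih =>
    intro H
    show pvAGo (t.length + 1) (c :: t) = "a"
    cases h : pvWords.get? (c :: t) with
    | some v =>
      exact absurd (List.suffix_refl (c :: t)) (H (c :: t, v) (pv_get?_some_mem h))
    | none =>
      have hsl : PySem.List.slice (c :: t) (some 1) none = t := by simp [pysem]
      simp only [pvAGo, h, hsl]
      exact ih (fun p hp hs => H p hp (hs.trans (List.suffix_cons c t)))

lemma pvAGo_match : ∀ (sub w : List Char) (d : String),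
    (w, d) ∈ pvWordPairs → w <:+ sub →
    (∀ p ∈ pvWordPairs, p.1 <:+ sub → p = (w, d)) → pvAGo sub.length sub = d := by
  intro sub
  induction sub with
  | nil =>
    intro w d hmem hw _
    rw [List.suffix_nil] at hw
    subst hw
    simp [pvWordPairs] at hmem
  | cons c t ih =>
    intro w d hmem hw H
    show pvAGo (t.length + 1) (c :: t) = d
    cases h : pvWords.get? (c :: t) with
    | some v =>
      have := H (c :: t, v) (pv_get?_some_mem h) (List.suffix_refl (c :: t))
      simp only [pvAGo, h]
      exact (Prod.mk.injEq _ _ _ _ ▸ this).2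
    | none =>
      have hne : w ≠ c :: t := by
        intro he
        exact pv_get?_none_not_mem h d (he ▸ hmem)
      have hw' : w <:+ t := (List.suffix_cons_iff.mp hw).resolve_left hne
      have hsl : PySem.List.slice (c :: t) (some 1) none = t := by simp [pysem]
      simp only [pvAGo, h, hsl]
      exact ih w d hmem hw' (fun p hp hs => H p hp (hs.trans (List.suffix_cons c t)))

lemma pv_alt_nomatch (s : String) (H : ∀ p ∈ pvWordPairs, ¬ p.1 <:+ s.toList) :
    checkForNumber_alt s = "a" := by
  have hf : ∀ p ∈ pvWordPairs, PySem.Chars.endswith s.toList p.1 = false := by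
    intro p hp
    rw [← Bool.not_eq_true, PySem.Chars.endswith_iff]
    exact H p hp
  have e1 : PySem.Chars.endswith s.toList ['o', 'n', 'e'] = false := hf ("one".toList, "1") (by decide)
  have e2 : PySem.Chars.endswith s.toList ['t', 'w', 'o'] = false := hf ("two".toList, "2") (by decide)
  have e3 : PySem.Chars.endswith s.toList ['t', 'h', 'r', 'e', 'e'] = false := hf ("three".toList, "3") (by decide)
  have e4 : PySem.Chars.endswith s.toList ['f', 'o', 'u', 'r'] = false := hf ("four".toList, "4") (by decide)
  have e5 : PySem.Chars.endswith s.toList ['f', 'i', 'v', 'e'] = false := hf ("five".toList, "5") (by decide)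
  have e6 : PySem.Chars.endswith s.toList ['s', 'i', 'x'] = false := hf ("six".toList, "6") (by decide)
  have e7 : PySem.Chars.endswith s.toList ['s', 'e', 'v', 'e', 'n'] = false := hf ("seven".toList, "7") (by decide)
  have e8 : PySem.Chars.endswith s.toList ['e', 'i', 'g', 'h', 't'] = false := hf ("eight".toList, "8") (by decide)
  have e9 : PySem.Chars.endswith s.toList ['n', 'i', 'n', 'e'] = false := hf ("nine".toList, "9") (by decide)
  simp [checkForNumber_alt, pvWordItems, e1, e2, e3, e4, e5, e6, e7, e8, e9]

lemma pv_alt_match (s : String) (w : List Char) (d : String)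
    (hmem : (w, d) ∈ pvWordPairs) (hw : w <:+ s.toList)
    (H : ∀ p ∈ pvWordPairs, p.1 <:+ s.toList → p = (w, d)) :
    checkForNumber_alt s = d := by
  have hb : ∀ p ∈ pvWordPairs, PySem.Chars.endswith s.toList p.1 = decide (p = (w, d)) := by
    intro p hp
    by_cases hc : p = (w, d)
    · simp only [hc, decide_true]
      rw [PySem.Chars.endswith_iff]
      exact hw
    · have hns : ¬ p.1 <:+ s.toList := fun hs => hc (H p hp hs)
      simp only [hc, decide_false]
      rw [← Bool.not_eq_true, PySem.Chars.endswith_iff]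
      exact hns
  have e1 : PySem.Chars.endswith s.toList ['o', 'n', 'e'] = decide (("one".toList, "1") = (w, d)) := hb ("one".toList, "1") (by decide)
  have e2 : PySem.Chars.endswith s.toList ['t', 'w', 'o'] = decide (("two".toList, "2") = (w, d)) := hb ("two".toList, "2") (by decide)
  have e3 : PySem.Chars.endswith s.toList ['t', 'h', 'r', 'e', 'e'] = decide (("three".toList, "3") = (w, d)) := hb ("three".toList, "3") (by decide)
  have e4 : PySem.Chars.endswith s.toList ['f', 'o', 'u', 'r'] = decide (("four".toList, "4") = (w, d)) := hb ("four".toList, "4") (by decide)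
  have e5 : PySem.Chars.endswith s.toList ['f', 'i', 'v', 'e'] = decide (("five".toList, "5") = (w, d)) := hb ("five".toList, "5") (by decide)
  have e6 : PySem.Chars.endswith s.toList ['s', 'i', 'x'] = decide (("six".toList, "6") = (w, d)) := hb ("six".toList, "6") (by decide)
  have e7 : PySem.Chars.endswith s.toList ['s', 'e', 'v', 'e', 'n'] = decide (("seven".toList, "7") = (w, d)) := hb ("seven".toList, "7") (by decide)
  have e8 : PySem.Chars.endswith s.toList ['e', 'i', 'g', 'h', 't'] = decide (("eight".toList, "8") = (w, d)) := hb ("eight".toList, "8") (by decide)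
  have e9 : PySem.Chars.endswith s.toList ['n', 'i', 'n', 'e'] = decide (("nine".toList, "9") = (w, d)) := hb ("nine".toList, "9") (by decide)
  have hm : ((w, d) = ("one".toList, "1")) ∨ ((w, d) = ("two".toList, "2")) ∨ ((w, d) = ("three".toList, "3")) ∨
      ((w, d) = ("four".toList, "4")) ∨ ((w, d) = ("five".toList, "5")) ∨ ((w, d) = ("six".toList, "6")) ∨
      ((w, d) = ("seven".toList, "7")) ∨ ((w, d) = ("eight".toList, "8")) ∨ ((w, d) = ("nine".toList, "9")) := by
    simpa [pvWordPairs] using hmem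
  rcases hm with h | h | h | h | h | h | h | h | h <;>
    · injection h with h1 h2
      subst h1
      subst h2
      simp [checkForNumber_alt, pvWordItems, e1, e2, e3, e4, e5, e6, e7, e8, e9]
      decide

lemma pv_A_head (s : String) : checkForNumber s = pvAGo s.toList.length s.toList := by
  have h1 : (PySem.Str.len s).toNat = s.toList.length := by simp [pysem]
  have h2 : (PySem.Str.slice s (some 0) none).toList = s.toList := by simp [pysem]
  rw [checkForNumber, h1, h2]

-- ===== VERDICT (by name: the statement is the Claim_ definition above) =====
theorem checkForNumber_spec : Claim_equal_checkForNumber := by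
  intro s _
  unfold Spec_checkForNumber
  by_cases hex : ∃ p ∈ pvWordPairs, p.1 <:+ s.toList
  · obtain ⟨p, hp, hs⟩ := hex
    have H : ∀ q ∈ pvWordPairs, q.1 <:+ s.toList → q = (p.1, p.2) := by
      intro q hq hqs
      simpa using pv_excl hq hp hqs hs
    have hmem : (p.1, p.2) ∈ pvWordPairs := by simpa using hp
    rw [pv_A_head, pvAGo_match s.toList p.1 p.2 hmem hs H,
      pv_alt_match s p.1 p.2 hmem hs H]
  · have hex' : ∀ p ∈ pvWordPairs, ¬ p.1 <:+ s.toList := fun p hp hs => hex ⟨p, hp, hs⟩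
    rw [pv_A_head, pvAGo_nomatch s.toList hex', pv_alt_nomatch s hex']
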